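-- pv_equiv track=rewrite | github.com/W-i-Z-o/ihatestau-public | neural-networks/model-runner.py | smooth_changes_simple
-- ===== SOURCE A (Python) =====
-- def smooth_changes_simple(inp, num, default):
--     def smoother(i):
--         r = default
--         c = [default]*num
--         for e in i:
--             c.append(e)
--             while len(c) > num:
--                 c.pop(0)
--
--             if c.count(e) == len(c):
--                 r = e
--
--             yield r
--
--     return list(smoother(inp))
-- ===== SOURCE B (Python) =====
-- def smooth_changes_simple(inp, num, default):
--     out = []
--     r = default
--     prev = default
--     run = num
--     for e in inp:
--         run = run + 1 if e == prev else 1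
--         if run >= num:
--             r = e
--         prev = e
--         out.append(r)
--     return out
-- ===== Notes on version B (the rewrite author's own statement) =====
-- stated objective: faster
-- what changed: Replaced A's per-element sliding-window maintenance (list pops and a full window count per element) with a single O(1)-per-element counter of the current consecutive-equal run, seeded with the num default pads.
import Mathlib
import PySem

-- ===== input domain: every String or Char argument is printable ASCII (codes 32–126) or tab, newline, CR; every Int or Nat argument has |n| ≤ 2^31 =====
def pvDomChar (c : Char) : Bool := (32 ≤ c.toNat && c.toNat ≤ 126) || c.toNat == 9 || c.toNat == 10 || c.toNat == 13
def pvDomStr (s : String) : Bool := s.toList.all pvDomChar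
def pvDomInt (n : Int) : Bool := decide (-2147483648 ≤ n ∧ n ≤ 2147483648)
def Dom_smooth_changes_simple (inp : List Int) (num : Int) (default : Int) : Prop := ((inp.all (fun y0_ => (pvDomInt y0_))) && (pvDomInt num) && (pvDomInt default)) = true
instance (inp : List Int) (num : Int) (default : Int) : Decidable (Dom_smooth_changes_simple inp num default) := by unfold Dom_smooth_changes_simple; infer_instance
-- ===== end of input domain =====

-- B replaces A's O(n·num) sliding window (list pops + count per element) by an O(n)
-- consecutive-equal run counter seeded with the num default pads.

-- ===== PORT A =====
-- the `while len(c) > num: c.pop(0)` loop; `none` = pop(0) on the empty list (IndexError)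
def pvPopLoop (c : List Int) (num : Int) : Option (List Int) :=
  if (c.length : Int) > num then
    match c with
    | [] => none
    | _ :: t => pvPopLoop t num
  else some c

-- the generator body: state r and window c, yielding r after each element
def pvSmootherGo (l : List Int) (num r : Int) (c : List Int) : Option (List Int) :=
  match l with
  | [] => some []
  | e :: rest =>
    match pvPopLoop (c ++ [e]) num with
    | none => none
    | some c2 =>
      let r' : Int := if c2.count e = c2.length then e else r
      match pvSmootherGo rest num r' c2 with
      | none => none
      | some out => some (r' :: out)

def smooth_changes_simple (inp : List Int) (num : Int) (default : Int) : List Int :=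
  (pvSmootherGo inp num default (List.replicate num.toNat default)).getD []

-- ===== PORT B =====
def pvAltGo (l : List Int) (num r prev run : Int) : List Int :=
  match l with
  | [] => []
  | e :: rest =>
    let run' : Int := if e = prev then run + 1 else 1
    let r' : Int := if num ≤ run' then e else r
    r' :: pvAltGo rest num r' e run'

def smooth_changes_simple_alt (inp : List Int) (num : Int) (default : Int) : List Int :=
  pvAltGo inp num default default num

-- ===== PRECONDITION & SPEC =====
-- Pre_ excludes num < 0 with non-empty inp: there A's `c.pop(0)` raises IndexError on the empty window.
def Pre_smooth_changes_simple (inp : List Int) (num : Int) (default : Int) : Prop :=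
  0 ≤ num ∨ inp = []
instance (inp : List Int) (num : Int) (default : Int) : Decidable (Pre_smooth_changes_simple inp num default) := by unfold Pre_smooth_changes_simple; infer_instance

def pvWitness_smooth_changes_simple : List Int × Int × Int := ([1, 1, 2, 2, 2, 3], 2, 0)

def Spec_smooth_changes_simple (inp : List Int) (num : Int) (default : Int) (out : List Int) : Prop := out = smooth_changes_simple_alt inp num default
instance (inp : List Int) (num : Int) (default : Int) (out : List Int) : Decidable (Spec_smooth_changes_simple inp num default out) := by unfold Spec_smooth_changes_simple; infer_instance

-- ===== CLAIM (what is proved, stated in full; the proofs are below) =====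
def Claim_equal_smooth_changes_simple : Prop := ∀ (inp : List Int) (num : Int) (default : Int), Dom_smooth_changes_simple inp num default → Pre_smooth_changes_simple inp num default → Spec_smooth_changes_simple inp num default (smooth_changes_simple inp num default)

-- ===== LEMMAS AND PROOFS =====

-- window invariant: reversed window = k copies of prev (k = min run num) then a block not starting with prev
def WInv (num : Int) (c : List Int) (prev run : Int) : Prop :=
  ∃ (k : Nat) (rest : List Int),
    c.reverse = List.replicate k prev ++ rest ∧
    (k : Int) = min run num ∧
    (c.length : Int) = num ∧
    (1 ≤ num → 1 ≤ run) ∧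
    (∀ x, rest.head? = some x → x ≠ prev)

lemma popLoop_le (c : List Int) (num : Int) (h : (c.length : Int) ≤ num) :
    pvPopLoop c num = some c := by
  unfold pvPopLoop
  simp [not_lt.mpr h]

lemma popLoop_step (c : List Int) (e num : Int) (hlen : (c.length : Int) = num) :
    pvPopLoop (c ++ [e]) num = some ((c ++ [e]).tail) := by
  cases c with
  | nil =>
    simp at hlen
    unfold pvPopLoop
    simp [← hlen]
    unfold pvPopLoop
    simp
  | cons a t =>
    have hgt : ((((a :: t) ++ [e]).length : Int)) > num := by
      simp at hlen ⊢; omega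
    have hle : ((t ++ [e]).length : Int) ≤ num := by simp at hlen ⊢; omega
    unfold pvPopLoop
    simp only [List.cons_append]
    rw [if_pos (by simpa using hgt)]
    simpa using popLoop_le _ _ hle

lemma tail_append_reverse (c : List Int) (e : Int) :
    ((c ++ [e]).tail).reverse = (e :: c.reverse).dropLast := by
  cases c with
  | nil => simp
  | cons a t =>
    simp only [List.cons_append, List.tail_cons, List.reverse_append,
      List.reverse_cons, List.reverse_nil, List.nil_append]
    rw [show e :: (t.reverse ++ [a]) = (e :: t.reverse) ++ [a] from rfl,
      List.dropLast_concat]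

lemma head?_dropLast_cons_cons (a b : Int) (t : List Int) :
    ((a :: b :: t)).dropLast.head? = some a := by
  simp

-- one window step preserves the invariant, and A's all-equal test equals B's run test
lemma winv_main (num : Int) (c : List Int) (prev run e : Int)
    (h : WInv num c prev run) (hnum : 0 ≤ num) :
    WInv num ((c ++ [e]).tail) e (if e = prev then run + 1 else 1) ∧
    (((c ++ [e]).tail).count e = ((c ++ [e]).tail).length ↔
      num ≤ (if e = prev then run + 1 else 1)) := by
  obtain ⟨k, rest, hrev, hk, hlen, hrun1, hhead⟩ := h
  have hrc2 : ((c ++ [e]).tail).reverse = (e :: c.reverse).dropLast := tail_append_reverse c e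
  have hlen2 : ((((c ++ [e]).tail)).length : Int) = num := by
    simp; omega
  have hlenc : c.length = k + rest.length := by
    have := congrArg List.length hrev
    simpa using this
  have hrun0 : 0 ≤ run := by omega
  have hcnt2 : (((c ++ [e]).tail).count e = ((c ++ [e]).tail).length) ↔
      ∀ b ∈ ((c ++ [e]).tail).reverse, e = b := by
    rw [← List.count_reverse, ← List.length_reverse, List.count_eq_length]
  by_cases hep : e = prev
  · subst hep
    rw [if_pos rfl]
    cases rest with
    | nil =>
      have hkeq : (k : Int) = num := by simp at hlenc; omega
      have hrc2' : ((c ++ [e]).tail).reverse = List.replicate k e := by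
        rw [hrc2, hrev, List.append_nil,
          show e :: List.replicate k e = List.replicate k e ++ [e] by
            simp [List.replicate_succ, ← List.replicate_succ'],
          List.dropLast_concat]
      constructor
      · exact ⟨k, [], by simpa using hrc2', by omega, hlen2, by omega, by simp⟩
      · rw [hcnt2, hrc2']
        simp only [List.mem_replicate]
        constructor
        · intro _; omega
        · intro _ b hb; exact hb.2.symm
    | cons x r2 =>
      have hx : x ≠ e := hhead x rfl
      have hlenc' : c.length = k + r2.length + 1 := by simpa using hlenc
      have hkr : run = k := by omega
      have hrc2' : ((c ++ [e]).tail).reverse =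
          List.replicate (k + 1) e ++ (x :: r2).dropLast := by
        rw [hrc2, hrev,
          show e :: (List.replicate k e ++ x :: r2) =
            List.replicate (k + 1) e ++ (x :: r2) by simp [List.replicate_succ],
          List.dropLast_append_of_ne_nil (by simp)]
      constructor
      · refine ⟨k + 1, (x :: r2).dropLast, hrc2', by push_cast; omega, hlen2,
          fun _ => by omega, ?_⟩
        intro y hy
        cases r2 with
        | nil => simp at hy
        | cons z r3 =>
          rw [head?_dropLast_cons_cons] at hy
          rw [show y = x by exact Option.some.inj hy.symm]
          exact hx
      · rw [hcnt2, hrc2']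
        cases r2 with
        | nil =>
          have hnum1 : num = (k : Int) + 1 := by simp at hlenc'; omega
          simp only [show ([x]).dropLast = [] by simp, List.append_nil,
            List.mem_replicate]
          constructor
          · intro _; omega
          · intro _ b hb; exact hb.2.symm
        | cons z r3 =>
          constructor
          · intro hall
            exact absurd (hall x (by simp [List.dropLast])).symm hx
          · intro hle
            exfalso
            simp at hlenc'; omega
  · rw [if_neg hep]
    by_cases hn1 : 1 ≤ num
    · have hrun : 1 ≤ run := hrun1 hn1
      have hk1 : 1 ≤ k := by omega
      obtain ⟨k0, rfl⟩ : ∃ k0, k = k0 + 1 := ⟨k - 1, by omega⟩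
      have hrevc : c.reverse = prev :: (List.replicate k0 prev ++ rest) := by
        rw [hrev]; simp [List.replicate_succ]
      have hrc2' : ((c ++ [e]).tail).reverse =
          e :: (prev :: (List.replicate k0 prev ++ rest)).dropLast := by
        rw [hrc2, hrevc]; rfl
      cases htl : List.replicate k0 prev ++ rest with
      | nil =>
        have hnum1 : num = 1 := by
          have : c.length = 1 := by
            rw [← List.length_reverse, hrevc, htl]; rfl
          omega
        rw [htl] at hrc2'
        constructor
        · exact ⟨1, [], by simpa using hrc2', by omega, hlen2, fun _ => le_refl 1,
            by simp⟩
        · rw [hcnt2, hrc2']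
          simp [hnum1]
      | cons a tl2 =>
        have hnum2 : 2 ≤ (c.length : Int) := by
          rw [← List.length_reverse, hrevc, htl]; simp; omega
        rw [htl] at hrc2'
        have hrc2'' : ((c ++ [e]).tail).reverse =
            List.replicate 1 e ++ (prev :: (a :: tl2).dropLast) := by
          rw [hrc2']; rfl
        constructor
        · refine ⟨1, prev :: (a :: tl2).dropLast, hrc2'', by omega, hlen2,
            fun _ => le_refl 1, ?_⟩
          intro y hy
          rw [show y = prev by exact Option.some.inj hy.symm]
          exact fun hc => hep hc.symm
        · rw [hcnt2, hrc2'']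
          constructor
          · intro hall
            exact absurd (hall prev (by simp)) hep
          · intro hle; exfalso; omega
    · have h0 : num = 0 := by omega
      have hc : c = [] := by
        have : c.length = 0 := by omega
        simpa using this
      subst hc
      constructor
      · exact ⟨0, [], by simp, by simp [h0], by simpa using hlen2, by omega, by simp⟩
      · simp [h0]

lemma go_eq (l : List Int) : ∀ (num r : Int) (c : List Int) (prev run : Int),
    0 ≤ num → WInv num c prev run →
    pvSmootherGo l num r c = some (pvAltGo l num r prev run) := by
  induction l with
  | nil => intro num r c prev run _ _; simp [pvSmootherGo, pvAltGo]
  | cons e rest ih =>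
    intro num r c prev run hnum hinv
    have hlen : (c.length : Int) = num := by
      obtain ⟨k, rs, _, _, hlen, _, _⟩ := hinv
      exact hlen
    obtain ⟨hstep, hchk⟩ := winv_main num c prev run e hinv hnum
    simp only [pvSmootherGo, pvAltGo, popLoop_step c e num hlen]
    rw [if_congr hchk rfl rfl]
    rw [ih num (if num ≤ (if e = prev then run + 1 else 1) then e else r)
      ((c ++ [e]).tail) e (if e = prev then run + 1 else 1) hnum hstep]

-- ===== VERDICT (by name: the statement is the Claim_ definition above) =====
theorem smooth_changes_simple_spec : Claim_equal_smooth_changes_simple := by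
  intro inp num default _ hpre
  unfold Spec_smooth_changes_simple
  rcases hpre with hnum | rfl
  · have hinv : WInv num (List.replicate num.toNat default) default num := by
      refine ⟨num.toNat, [], by simp, by simp [Int.toNat_of_nonneg hnum],
        by simp [Int.toNat_of_nonneg hnum], fun h => h, by simp⟩
    unfold smooth_changes_simple smooth_changes_simple_alt
    rw [go_eq inp num default _ default num hnum hinv]
    rfl
  · rfl
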